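-- pv_equiv track=rewrite | github.com/AilvenLiu/tvm | python/tvm/tirx/op_dispatch/cuda/reduction.py | build_src_indices
-- ===== SOURCE A (Python) =====
-- def build_src_indices(spa_fused, red_fused, spatial_dims, reduce_dims, src_extent, src_st):
--     """Combine spatial and reduction indices into full src index tuple."""
--
--     # Build index helpers that work with the explicit axis split
--     def get_spatial_or_reduction_src_indices(spa_or_red_fused, is_spatial):
--         dims = spatial_dims if is_spatial else reduce_dims
--         spa_extents = [src_extent[d] for d in dims]
--         indices = []
--         rem = spa_or_red_fused
--         for e in reversed(spa_extents):
--             indices.append(rem % e)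
--             rem //= e
--         indices.reverse()
--         return [idx + src_st[d] for idx, d in zip(indices, dims)]
--
--     spa_vals = get_spatial_or_reduction_src_indices(spa_fused, is_spatial=True)
--     red_vals = get_spatial_or_reduction_src_indices(red_fused, is_spatial=False)
--     full = [None] * len(src_extent)
--     for i, d in enumerate(spatial_dims):
--         full[d] = spa_vals[i]
--     for i, d in enumerate(reduce_dims):
--         full[d] = red_vals[i]
--     return full
-- ===== SOURCE B (Python) =====
-- def build_src_indices(spa_fused, red_fused, spatial_dims, reduce_dims, src_extent, src_st):
--     """Combine spatial and reduction indices into full src index tuple."""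
--
--     def decode(fused, extents):
--         # recursive mixed-radix decode, built front-to-back (no reverse pass)
--         if not extents:
--             return []
--         return decode(fused // extents[-1], extents[:-1]) + [fused % extents[-1]]
--
--     full = [None] * len(src_extent)
--     for fused, dims in ((spa_fused, spatial_dims), (red_fused, reduce_dims)):
--         digits = decode(fused, [src_extent[d] for d in dims])
--         for d, idx in zip(dims, digits):
--             full[d] = idx + src_st[d]
--     return full
-- ===== Notes on version B (the rewrite author's own statement) =====
-- stated objective: alternative
-- what changed: B replaces A's append-remainder-then-reverse loop and separate per-group value/scatter passes by a recursive mixed-radix decode built front-to-back whose digits are scattered straight into the result inside one loop over the two groups.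
-- outside the precondition, e.g. on build_src_indices(0, 0, [], [], [1], [0]): A returns [None], B returns [None]
import Mathlib
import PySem

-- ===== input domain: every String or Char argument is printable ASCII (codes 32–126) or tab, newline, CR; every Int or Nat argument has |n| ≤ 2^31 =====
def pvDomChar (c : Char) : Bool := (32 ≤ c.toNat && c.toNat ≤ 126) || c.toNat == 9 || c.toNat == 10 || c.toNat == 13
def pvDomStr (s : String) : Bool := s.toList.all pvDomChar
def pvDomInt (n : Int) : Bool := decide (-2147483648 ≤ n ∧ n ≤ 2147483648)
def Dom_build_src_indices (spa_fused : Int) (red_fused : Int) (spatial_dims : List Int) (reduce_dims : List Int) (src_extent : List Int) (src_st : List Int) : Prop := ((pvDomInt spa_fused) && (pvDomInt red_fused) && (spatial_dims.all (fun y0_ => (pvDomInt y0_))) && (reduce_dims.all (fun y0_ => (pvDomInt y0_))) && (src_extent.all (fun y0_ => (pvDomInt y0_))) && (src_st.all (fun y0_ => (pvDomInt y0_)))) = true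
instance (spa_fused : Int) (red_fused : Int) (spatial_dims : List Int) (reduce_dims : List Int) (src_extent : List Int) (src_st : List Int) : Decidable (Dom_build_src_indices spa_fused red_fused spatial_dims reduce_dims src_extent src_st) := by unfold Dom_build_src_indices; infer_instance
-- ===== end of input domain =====

-- B decodes each fused index with a recursive right-to-left mixed-radix decode built front-to-back
-- and scatters each digit straight into the result, instead of A's loop that appends remainders and
-- reverses, builds per-group value lists, and scatters them in separate enumerate loops (objective: alternative).
-- Python A's `full` starts as [None]*n; under Pre_ every slot is assigned, so both ports totalise the
-- initial list with 0 (never observable inside Pre_).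

-- ===== PORT A =====
-- one step of A's `for e in reversed(spa_extents): indices.append(rem % e); rem //= e`
def pvPeelStep (st : List Int × Int) (e : Int) : List Int × Int :=
  (st.1 ++ [PySem.Int.mod st.2 e], PySem.Int.floordiv st.2 e)

-- A's inner helper get_spatial_or_reduction_src_indices
def pvGroupA (fused : Int) (dims : List Int) (src_extent : List Int) (src_st : List Int) : List Int :=
  (((((dims.map (fun d => PySem.List.pyGetD src_extent d 0)).reverse.foldl
      pvPeelStep ([], fused)).1).reverse).zip dims).map
    (fun p => p.1 + PySem.List.pyGetD src_st p.2 0)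

-- A's `for i, d in enumerate(dims): full[d] = vals[i]`
def pvScatterA (full : List Int) (pairs : List (Int × Int)) : List Int :=
  pairs.foldl (fun f p => PySem.List.pySetD f p.1 p.2) full

def build_src_indices (spa_fused : Int) (red_fused : Int) (spatial_dims : List Int) (reduce_dims : List Int) (src_extent : List Int) (src_st : List Int) : List Int :=
  let spa_vals := pvGroupA spa_fused spatial_dims src_extent src_st
  let red_vals := pvGroupA red_fused reduce_dims src_extent src_st
  let full := List.replicate src_extent.length (0 : Int)
  pvScatterA (pvScatterA full (spatial_dims.zip spa_vals)) (reduce_dims.zip red_vals)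

-- ===== PORT B =====
-- B's recursive decode: decode(f, es) = decode(f // es[-1], es[:-1]) + [f % es[-1]]
def pvDecode (f : Int) (extents : List Int) : List Int :=
  if h : extents = [] then []
  else
    pvDecode (PySem.Int.floordiv f (extents.getLast h)) extents.dropLast ++
      [PySem.Int.mod f (extents.getLast h)]
termination_by extents.length
decreasing_by
  have : extents.length ≠ 0 := fun h0 => h (List.eq_nil_of_length_eq_zero h0)
  simp only [List.length_dropLast]
  omega

def build_src_indices_alt (spa_fused : Int) (red_fused : Int) (spatial_dims : List Int) (reduce_dims : List Int) (src_extent : List Int) (src_st : List Int) : List Int :=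
  [(spa_fused, spatial_dims), (red_fused, reduce_dims)].foldl
    (fun full fr =>
      (fr.2.zip (pvDecode fr.1 (fr.2.map (fun d => PySem.List.pyGetD src_extent d 0)))).foldl
        (fun f p => PySem.List.pySetD f p.1 (p.2 + PySem.List.pyGetD src_st p.1 0)) full)
    (List.replicate src_extent.length (0 : Int))

-- ===== PRECONDITION & SPEC =====
-- Pre_ excludes exactly the inputs where Python A yields no List-int value: dims out of Python index
-- range for src_extent/src_st (IndexError), a zero extent at a used dim (ZeroDivisionError), and
-- uncovered positions of src_extent (the returned list still contains None, outside the declared type).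
def Pre_build_src_indices (spa_fused : Int) (red_fused : Int) (spatial_dims : List Int) (reduce_dims : List Int) (src_extent : List Int) (src_st : List Int) : Prop :=
  (∀ d ∈ spatial_dims ++ reduce_dims,
      (-(src_extent.length : Int) ≤ d ∧ d < src_extent.length) ∧
      (-(src_st.length : Int) ≤ d ∧ d < src_st.length) ∧
      PySem.List.pyGetD src_extent d 0 ≠ 0) ∧
  (∀ i ∈ List.range src_extent.length,
      ∃ d ∈ spatial_dims ++ reduce_dims,
        (if d < 0 then d + (src_extent.length : Int) else d) = (i : Int))
instance (spa_fused : Int) (red_fused : Int) (spatial_dims : List Int) (reduce_dims : List Int) (src_extent : List Int) (src_st : List Int) : Decidable (Pre_build_src_indices spa_fused red_fused spatial_dims reduce_dims src_extent src_st) := by unfold Pre_build_src_indices; infer_instance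

def pvWitness_build_src_indices : Int × Int × List Int × List Int × List Int × List Int :=
  (6, 1, [0, 2], [1], [2, 3, 4], [0, 1, 0])

def Spec_build_src_indices (spa_fused : Int) (red_fused : Int) (spatial_dims : List Int) (reduce_dims : List Int) (src_extent : List Int) (src_st : List Int) (out : List Int) : Prop := out = build_src_indices_alt spa_fused red_fused spatial_dims reduce_dims src_extent src_st
instance (spa_fused : Int) (red_fused : Int) (spatial_dims : List Int) (reduce_dims : List Int) (src_extent : List Int) (src_st : List Int) (out : List Int) : Decidable (Spec_build_src_indices spa_fused red_fused spatial_dims reduce_dims src_extent src_st out) := by unfold Spec_build_src_indices; infer_instance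

-- ===== CLAIM (what is proved, stated in full; the proofs are below) =====
def Claim_equal_build_src_indices : Prop := ∀ (spa_fused : Int) (red_fused : Int) (spatial_dims : List Int) (reduce_dims : List Int) (src_extent : List Int) (src_st : List Int), Dom_build_src_indices spa_fused red_fused spatial_dims reduce_dims src_extent src_st → Pre_build_src_indices spa_fused red_fused spatial_dims reduce_dims src_extent src_st → Spec_build_src_indices spa_fused red_fused spatial_dims reduce_dims src_extent src_st (build_src_indices spa_fused red_fused spatial_dims reduce_dims src_extent src_st)

-- ===== LEMMAS AND PROOFS =====

-- A's loop state: the accumulator only collects, it never influences later steps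
theorem pvPeel_fst (L : List Int) (acc : List Int) (f : Int) :
    (L.foldl pvPeelStep (acc, f)).1 = acc ++ (L.foldl pvPeelStep ([], f)).1 := by
  induction L generalizing acc f with
  | nil => simp
  | cons e L ih =>
      simp only [List.foldl_cons, pvPeelStep, List.nil_append]
      rw [ih, ih [PySem.Int.mod f e]]
      simp

-- A's peel-then-reverse equals B's recursive decode, for every integer extent list
theorem pvPeel_eq_decode (exts : List Int) (f : Int) :
    ((exts.reverse.foldl pvPeelStep ([], f)).1).reverse = pvDecode f exts := by
  induction exts using List.reverseRecOn generalizing f with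
  | nil => simp [pvDecode]
  | append_singleton es e ih =>
      rw [pvDecode]
      simp only [List.reverse_append, List.reverse_cons, List.reverse_nil, List.nil_append,
        List.cons_append, List.foldl_cons]
      rw [show pvPeelStep ([], f) e = ([PySem.Int.mod f e], PySem.Int.floordiv f e) from rfl]
      rw [pvPeel_fst es.reverse [PySem.Int.mod f e] (PySem.Int.floordiv f e)]
      simp only [List.reverse_append, List.reverse_cons, List.reverse_nil, List.nil_append,
        List.getLast_concat, List.dropLast_concat]
      rw [ih]
      simp

-- packaging: A's zip-then-scatter pairs are B's scatter pairs
theorem pvPairs_eq (fused : Int) (dims src_extent src_st : List Int) :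
    dims.zip (pvGroupA fused dims src_extent src_st) =
      (dims.zip (pvDecode fused (dims.map (fun d => PySem.List.pyGetD src_extent d 0)))).map
        (fun p => (p.1, p.2 + PySem.List.pyGetD src_st p.1 0)) := by
  unfold pvGroupA
  rw [pvPeel_eq_decode]
  set idxs := pvDecode fused (dims.map (fun d => PySem.List.pyGetD src_extent d 0))
  apply List.ext_getElem
  · simp; omega
  · intro i h1 h2
    simp [List.getElem_zip, List.getElem_map]

-- scattering B's pairs is A's scatter of the zipped values
theorem pvScatter_map (pairs : List (Int × Int)) (src_st : List Int) (full : List Int) :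
    pvScatterA full (pairs.map (fun p => (p.1, p.2 + PySem.List.pyGetD src_st p.1 0))) =
      pairs.foldl (fun f p => PySem.List.pySetD f p.1 (p.2 + PySem.List.pyGetD src_st p.1 0)) full := by
  induction pairs generalizing full with
  | nil => rfl
  | cons p ps ih => simp only [pvScatterA, List.map_cons, List.foldl_cons] at *; rw [ih]

-- ===== VERDICT (by name: the statement is the Claim_ definition above) =====
theorem build_src_indices_spec : Claim_equal_build_src_indices := by
  intro spa_fused red_fused spatial_dims reduce_dims src_extent src_st _ _
  unfold Spec_build_src_indices build_src_indices build_src_indices_alt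
  simp only [List.foldl_cons, List.foldl_nil]
  rw [← pvScatter_map, ← pvScatter_map, ← pvPairs_eq, ← pvPairs_eq]
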